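-- pv_equiv track=rewrite | github.com/Drmusab/-1995 | src/skills/builtin/coaching_skills.py | _detect_logical_fallacies
-- ===== SOURCE A (Python) =====
-- from typing import Any, AsyncGenerator, Callable, Dict, List, Optional, Set, Type, Union
--
-- def _detect_logical_fallacies(argument: str) -> List[Dict[str, str]]:
--     """Detect potential logical fallacies in the argument."""
--     fallacies = []
--
--     # Ad hominem
--     if any(word in argument.lower() for word in ["stupid", "ignorant", "fool", "idiot"]):
--         fallacies.append({
--             "type": "ad_hominem",
--             "description": "Attacking the person rather than the argument",
--             "severity": "high"
--         })
--
--     # False dichotomy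
--     if any(phrase in argument.lower() for phrase in ["either...or", "only two", "must choose"]):
--         fallacies.append({
--             "type": "false_dichotomy",
--             "description": "Presenting only two options when more exist",
--             "severity": "medium"
--         })
--
--     # Appeal to emotion
--     if any(word in argument.lower() for word in ["terrible", "horrible", "wonderful", "amazing"]) and "because" not in argument.lower():
--         fallacies.append({
--             "type": "appeal_to_emotion",
--             "description": "Using emotion instead of logical reasoning",
--             "severity": "medium"
--         })
--
--     # Slippery slope
--     if any(phrase in argument.lower() for phrase in ["will lead to", "next thing", "eventually"]):
--         fallacies.append({
--             "type": "slippery_slope",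
--             "description": "Assuming one event will lead to extreme consequences",
--             "severity": "medium"
--         })
--
--     return fallacies
-- ===== SOURCE B (Python) =====
-- # Single left-to-right scan of the text: at each position, mark which rules have a
-- # trigger pattern starting there (naive multi-pattern matching), then emit the
-- # fallacy entries for the fired rules, honouring the emotion rule's "because" veto.
--
-- _PATTERNS = [
--     ("stupid", 0), ("ignorant", 0), ("fool", 0), ("idiot", 0),
--     ("either...or", 1), ("only two", 1), ("must choose", 1),
--     ("terrible", 2), ("horrible", 2), ("wonderful", 2), ("amazing", 2),
--     ("because", -1),
--     ("will lead to", 3), ("next thing", 3), ("eventually", 3),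
-- ]
--
-- _ENTRIES = [
--     (0, {"type": "ad_hominem",
--          "description": "Attacking the person rather than the argument",
--          "severity": "high"}),
--     (1, {"type": "false_dichotomy",
--          "description": "Presenting only two options when more exist",
--          "severity": "medium"}),
--     (2, {"type": "appeal_to_emotion",
--          "description": "Using emotion instead of logical reasoning",
--          "severity": "medium"}),
--     (3, {"type": "slippery_slope",
--          "description": "Assuming one event will lead to extreme consequences",
--          "severity": "medium"}),
-- ]
--
-- def _detect_logical_fallacies(argument: str):
--     """Detect potential logical fallacies (one-pass position scan)."""
--     text = argument.lower()
--     fired = set()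
--     for i in range(len(text)):
--         for pat, rid in _PATTERNS:
--             if text.startswith(pat, i):
--                 fired.add(rid)
--     result = []
--     for rid, entry in _ENTRIES:
--         if rid in fired and not (rid == 2 and -1 in fired):
--             result.append(dict(entry))
--     return result
-- ===== Notes on version B (the rewrite author's own statement) =====
-- stated objective: alternative
-- what changed: Replaces four independent per-keyword substring searches with a single left-to-right scan of the lowercased text that matches all 15 patterns at each position into a fired-rule set, then emits entries from a table for the fired rules (with the 'because' pattern acting as a veto on the emotion rule).
import Mathlib
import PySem

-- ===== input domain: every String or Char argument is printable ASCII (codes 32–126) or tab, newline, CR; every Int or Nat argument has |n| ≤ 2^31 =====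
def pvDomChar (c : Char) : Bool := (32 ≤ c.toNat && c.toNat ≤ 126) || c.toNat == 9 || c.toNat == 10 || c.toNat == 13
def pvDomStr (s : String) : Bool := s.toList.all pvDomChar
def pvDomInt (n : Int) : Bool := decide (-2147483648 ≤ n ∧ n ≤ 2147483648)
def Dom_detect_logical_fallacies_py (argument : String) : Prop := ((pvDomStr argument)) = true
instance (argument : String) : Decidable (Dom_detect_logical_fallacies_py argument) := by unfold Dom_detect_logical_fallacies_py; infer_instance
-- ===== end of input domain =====

-- B replaces four per-keyword substring searches by a single position scan of the
-- lowercased text matching all patterns at once into a fired-rule set (alternative, same cost).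

-- ===== PORT A =====
-- literal transliteration of A: four sequential if-blocks, each re-lowering the argument, appending a dict literal
def detect_logical_fallacies_py (argument : String) : List (List (String × String)) :=
  let fallacies : List (List (String × String)) := []
  let fallacies :=
    if (["stupid", "ignorant", "fool", "idiot"].any
        (fun w => PySem.Str.isIn w (PySem.Str.lower argument))) then
      fallacies ++ [[("type", "ad_hominem"),
                     ("description", "Attacking the person rather than the argument"),
                     ("severity", "high")]]
    else fallacies
  let fallacies :=
    if (["either...or", "only two", "must choose"].any
        (fun p => PySem.Str.isIn p (PySem.Str.lower argument))) then
      fallacies ++ [[("type", "false_dichotomy"),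
                     ("description", "Presenting only two options when more exist"),
                     ("severity", "medium")]]
    else fallacies
  let fallacies :=
    if ((["terrible", "horrible", "wonderful", "amazing"].any
        (fun w => PySem.Str.isIn w (PySem.Str.lower argument)))
        && !(PySem.Str.isIn "because" (PySem.Str.lower argument))) then
      fallacies ++ [[("type", "appeal_to_emotion"),
                     ("description", "Using emotion instead of logical reasoning"),
                     ("severity", "medium")]]
    else fallacies
  let fallacies :=
    if (["will lead to", "next thing", "eventually"].any
        (fun p => PySem.Str.isIn p (PySem.Str.lower argument))) then
      fallacies ++ [[("type", "slippery_slope"),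
                     ("description", "Assuming one event will lead to extreme consequences"),
                     ("severity", "medium")]]
    else fallacies
  fallacies

-- ===== PORT B =====
-- the pattern table: (trigger substring, rule id); -1 is the 'because' veto pseudo-rule
def pvPatterns : List (String × Int) :=
  [("stupid", 0), ("ignorant", 0), ("fool", 0), ("idiot", 0),
   ("either...or", 1), ("only two", 1), ("must choose", 1),
   ("terrible", 2), ("horrible", 2), ("wonderful", 2), ("amazing", 2),
   ("because", -1),
   ("will lead to", 3), ("next thing", 3), ("eventually", 3)]

-- the output table: (rule id, fallacy entry)
def pvEntries : List (Int × List (String × String)) :=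
  [(0, [("type", "ad_hominem"),
        ("description", "Attacking the person rather than the argument"),
        ("severity", "high")]),
   (1, [("type", "false_dichotomy"),
        ("description", "Presenting only two options when more exist"),
        ("severity", "medium")]),
   (2, [("type", "appeal_to_emotion"),
        ("description", "Using emotion instead of logical reasoning"),
        ("severity", "medium")]),
   (3, [("type", "slippery_slope"),
        ("description", "Assuming one event will lead to extreme consequences"),
        ("severity", "medium")])]

-- 'for i in range(len(text))' ported as List.range over Nat indices (all indices nonnegative);
-- 'text.startswith(pat, i)' for 0 ≤ i is exactly 'pat.toList <+: text.toList.drop i' (isPrefixOf).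
def detect_logical_fallacies_py_alt (argument : String) : List (List (String × String)) :=
  let text := (PySem.Str.lower argument).toList
  let fired : PySem.Set Int :=
    (List.range text.length).foldl
      (fun s i =>
        pvPatterns.foldl
          (fun s pr => if pr.1.toList.isPrefixOf (text.drop i) then PySem.Set.add s pr.2 else s)
          s)
      PySem.Set.empty
  pvEntries.foldl
    (fun out e =>
      if PySem.Set.contains fired e.1 && !(e.1 == 2 && PySem.Set.contains fired (-1)) then
        out ++ [e.2]
      else out)
    []

-- ===== PRECONDITION & SPEC =====
def Spec_detect_logical_fallacies_py (argument : String) (out : List (List (String × String))) : Prop := out = detect_logical_fallacies_py_alt argument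
instance (argument : String) (out : List (List (String × String))) : Decidable (Spec_detect_logical_fallacies_py argument out) := by unfold Spec_detect_logical_fallacies_py; infer_instance

-- ===== CLAIM =====
def Claim_equal_detect_logical_fallacies_py : Prop := ∀ (argument : String), Dom_detect_logical_fallacies_py argument → Spec_detect_logical_fallacies_py argument (detect_logical_fallacies_py argument)

-- ===== LEMMAS AND PROOFS =====

-- membership in a fold of conditional Set.add
theorem mem_foldl_addIf {β : Type} (l : List β) (c : β → Bool) (f : β → Int)
    (s0 : PySem.Set Int) (x : Int) :
    x ∈ l.foldl (fun s b => if c b then PySem.Set.add s (f b) else s) s0 ↔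
      x ∈ s0 ∨ ∃ b ∈ l, c b ∧ x = f b := by
  induction l generalizing s0 with
  | nil => simp
  | cons b l ih =>
    simp only [List.foldl_cons, ih]
    by_cases hb : c b <;> (simp [hb, PySem.Set.mem_add]; try tauto)

-- membership in the nested fired-set fold
theorem mem_fired (text : List Char) (l : List Nat) (s0 : PySem.Set Int) (x : Int) :
    x ∈ l.foldl
      (fun s i =>
        pvPatterns.foldl
          (fun s pr => if pr.1.toList.isPrefixOf (text.drop i) then PySem.Set.add s pr.2 else s)
          s)
      s0 ↔
    x ∈ s0 ∨ ∃ i ∈ l, ∃ pr ∈ pvPatterns, pr.1.toList.isPrefixOf (text.drop i) ∧ x = pr.2 := by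
  induction l generalizing s0 with
  | nil => simp
  | cons i l ih =>
    simp only [List.foldl_cons, ih, mem_foldl_addIf, List.mem_cons]
    constructor
    · rintro (⟨h | ⟨pr, hpr, hc, hx⟩⟩ | ⟨j, hj, pr, hpr, hc, hx⟩)
      · exact Or.inl h
      · exact Or.inr ⟨i, Or.inl rfl, pr, hpr, hc, hx⟩
      · exact Or.inr ⟨j, Or.inr hj, pr, hpr, hc, hx⟩
    · rintro (h | ⟨j, (rfl | hj), pr, hpr, hc, hx⟩)
      · exact Or.inl (Or.inl h)
      · exact Or.inl (Or.inr ⟨pr, hpr, hc, hx⟩)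
      · exact Or.inr ⟨j, hj, pr, hpr, hc, hx⟩

-- a nonempty pattern occurs as an infix iff it is a prefix at some index below the length
theorem occurs_iff_isIn (pat : String) (text : List Char) (hne : pat.toList ≠ []) :
    (∃ i ∈ List.range text.length, pat.toList.isPrefixOf (text.drop i)) ↔
      PySem.Chars.isIn pat.toList text = true := by
  rw [← PySem.Chars.exists_prefix_drop_iff_isIn]
  constructor
  · rintro ⟨i, _, h⟩
    exact ⟨i, List.isPrefixOf_iff_prefix.mp h⟩
  · rintro ⟨j, h⟩
    by_cases hj : j < text.length
    · exact ⟨j, List.mem_range.mpr hj, List.isPrefixOf_iff_prefix.mpr h⟩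
    · exfalso
      rw [List.drop_eq_nil_of_le (le_of_not_gt hj)] at h
      exact hne (List.prefix_nil.mp h)

-- which rule ids are in the fired set, in terms of A's isIn conditions
theorem contains_fired (argument : String) (x : Int) :
    PySem.Set.contains
      ((List.range (PySem.Str.lower argument).toList.length).foldl
        (fun s i =>
          pvPatterns.foldl
            (fun s pr => if pr.1.toList.isPrefixOf ((PySem.Str.lower argument).toList.drop i) then PySem.Set.add s pr.2 else s)
            s)
        PySem.Set.empty) x = true ↔
    ∃ pr ∈ pvPatterns, pr.2 = x ∧ PySem.Str.isIn pr.1 (PySem.Str.lower argument) = true := by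
  rw [PySem.Set.contains_iff, mem_fired]
  simp only [PySem.Set.empty, List.not_mem_nil, false_or]
  constructor
  · rintro ⟨i, hi, pr, hpr, hc, rfl⟩
    refine ⟨pr, hpr, rfl, ?_⟩
    rw [PySem.Str.isIn_eq]
    have hne : pr.1.toList ≠ [] := by
      fin_cases hpr <;> simp
    exact (occurs_iff_isIn pr.1 _ hne).mp ⟨i, hi, hc⟩
  · rintro ⟨pr, hpr, rfl, hin⟩
    rw [PySem.Str.isIn_eq] at hin
    have hne : pr.1.toList ≠ [] := by
      fin_cases hpr <;> simp
    obtain ⟨i, hi, hc⟩ := (occurs_iff_isIn pr.1 _ hne).mpr hin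
    exact ⟨i, hi, pr, hpr, hc, rfl⟩

theorem contains_fired0 (argument : String) :
    PySem.Set.contains
      ((List.range (PySem.Str.lower argument).toList.length).foldl
        (fun s i =>
          pvPatterns.foldl
            (fun s pr => if pr.1.toList.isPrefixOf ((PySem.Str.lower argument).toList.drop i) then PySem.Set.add s pr.2 else s)
            s)
        PySem.Set.empty) 0 =
    (PySem.Str.isIn "stupid" (PySem.Str.lower argument) || PySem.Str.isIn "ignorant" (PySem.Str.lower argument) || PySem.Str.isIn "fool" (PySem.Str.lower argument) || PySem.Str.isIn "idiot" (PySem.Str.lower argument)) := by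
  rw [Bool.eq_iff_iff]
  try simp only [Bool.or_eq_true]
  rw [contains_fired]
  simp [pvPatterns]
  try tauto

theorem contains_fired1 (argument : String) :
    PySem.Set.contains
      ((List.range (PySem.Str.lower argument).toList.length).foldl
        (fun s i =>
          pvPatterns.foldl
            (fun s pr => if pr.1.toList.isPrefixOf ((PySem.Str.lower argument).toList.drop i) then PySem.Set.add s pr.2 else s)
            s)
        PySem.Set.empty) 1 =
    (PySem.Str.isIn "either...or" (PySem.Str.lower argument) || PySem.Str.isIn "only two" (PySem.Str.lower argument) || PySem.Str.isIn "must choose" (PySem.Str.lower argument)) := by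
  rw [Bool.eq_iff_iff]
  try simp only [Bool.or_eq_true]
  rw [contains_fired]
  simp [pvPatterns]
  try tauto

theorem contains_fired2 (argument : String) :
    PySem.Set.contains
      ((List.range (PySem.Str.lower argument).toList.length).foldl
        (fun s i =>
          pvPatterns.foldl
            (fun s pr => if pr.1.toList.isPrefixOf ((PySem.Str.lower argument).toList.drop i) then PySem.Set.add s pr.2 else s)
            s)
        PySem.Set.empty) 2 =
    (PySem.Str.isIn "terrible" (PySem.Str.lower argument) || PySem.Str.isIn "horrible" (PySem.Str.lower argument) || PySem.Str.isIn "wonderful" (PySem.Str.lower argument) || PySem.Str.isIn "amazing" (PySem.Str.lower argument)) := by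
  rw [Bool.eq_iff_iff]
  try simp only [Bool.or_eq_true]
  rw [contains_fired]
  simp [pvPatterns]
  try tauto

theorem contains_firedm (argument : String) :
    PySem.Set.contains
      ((List.range (PySem.Str.lower argument).toList.length).foldl
        (fun s i =>
          pvPatterns.foldl
            (fun s pr => if pr.1.toList.isPrefixOf ((PySem.Str.lower argument).toList.drop i) then PySem.Set.add s pr.2 else s)
            s)
        PySem.Set.empty) (-1) =
    (PySem.Str.isIn "because" (PySem.Str.lower argument)) := by
  rw [Bool.eq_iff_iff]
  try simp only [Bool.or_eq_true]
  rw [contains_fired]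
  simp [pvPatterns]
  try tauto

theorem contains_fired3 (argument : String) :
    PySem.Set.contains
      ((List.range (PySem.Str.lower argument).toList.length).foldl
        (fun s i =>
          pvPatterns.foldl
            (fun s pr => if pr.1.toList.isPrefixOf ((PySem.Str.lower argument).toList.drop i) then PySem.Set.add s pr.2 else s)
            s)
        PySem.Set.empty) 3 =
    (PySem.Str.isIn "will lead to" (PySem.Str.lower argument) || PySem.Str.isIn "next thing" (PySem.Str.lower argument) || PySem.Str.isIn "eventually" (PySem.Str.lower argument)) := by
  rw [Bool.eq_iff_iff]
  try simp only [Bool.or_eq_true]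
  rw [contains_fired]
  simp [pvPatterns]
  try tauto

theorem ports_agree (argument : String) :
    detect_logical_fallacies_py argument = detect_logical_fallacies_py_alt argument := by
  simp only [detect_logical_fallacies_py, detect_logical_fallacies_py_alt, pvEntries,
    List.foldl_cons, List.foldl_nil,
    contains_fired0, contains_fired1, contains_fired2, contains_firedm, contains_fired3,
    List.any_cons, List.any_nil, Bool.or_false, List.nil_append]
  simp
  simp only [or_assoc]

-- ===== VERDICT =====
theorem detect_logical_fallacies_py_spec : Claim_equal_detect_logical_fallacies_py := by
  intro argument _
  unfold Spec_detect_logical_fallacies_py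
  exact ports_agree argument
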